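-- pv_equiv track=rewrite | github.com/zampierilucas/kindle-ble-hid | bumble_ble_hid/Scripts/brightness_curve_comparison.py | simulate_brightness_up_adaptive
-- ===== SOURCE A (Python) =====
-- MAX_BRIGHTNESS = 2010
--
-- MIN_STEP = 10
--
-- def simulate_brightness_up_adaptive(start, num_presses):
--     """Simulate adaptive brightness increases"""
--     brightness_values = [start]
--     current = start
--
--     for _ in range(num_presses):
--         if current == 0:
--             step = MIN_STEP
--         else:
--             step = max(MIN_STEP, int(current * 5 / 100))
--
--         current = min(MAX_BRIGHTNESS, current + step)
--         brightness_values.append(current)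
--
--     return brightness_values
-- ===== SOURCE B (Python) =====
-- MAX_BRIGHTNESS = 2010
--
-- MIN_STEP = 10
--
-- def simulate_brightness_up_adaptive(start, num_presses):
--     """Three-phase computation: closed-form linear ramp, proportional growth, saturation."""
--     n = max(0, num_presses)
--     # Phase 1 (closed form): below 200 the adaptive step is always exactly MIN_STEP,
--     # so the values form the arithmetic progression start, start+10, ...
--     k = min(n, (200 - start + 9) // 10) if start < 200 else 0
--     values = [start + 10 * i for i in range(k + 1)]
--     current = start + 10 * k
--     # Phase 2/3: proportional 5% steps; constant once the cap is reached
--     for _ in range(n - k):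
--         if current >= MAX_BRIGHTNESS:
--             values.append(MAX_BRIGHTNESS)
--         else:
--             current = min(MAX_BRIGHTNESS, current + current * 5 // 100)
--             values.append(current)
--     return values
-- ===== Notes on version B (the rewrite author's own statement) =====
-- stated objective: alternative
-- what changed: B replaces A's uniform press-by-press recurrence with a three-phase computation: the sub-200 ramp is emitted as a closed-form arithmetic progression (each press there provably adds exactly MIN_STEP), only the 5%-proportional band iterates the step, and at the cap it appends the constant without recomputing the step.
import Mathlib
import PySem

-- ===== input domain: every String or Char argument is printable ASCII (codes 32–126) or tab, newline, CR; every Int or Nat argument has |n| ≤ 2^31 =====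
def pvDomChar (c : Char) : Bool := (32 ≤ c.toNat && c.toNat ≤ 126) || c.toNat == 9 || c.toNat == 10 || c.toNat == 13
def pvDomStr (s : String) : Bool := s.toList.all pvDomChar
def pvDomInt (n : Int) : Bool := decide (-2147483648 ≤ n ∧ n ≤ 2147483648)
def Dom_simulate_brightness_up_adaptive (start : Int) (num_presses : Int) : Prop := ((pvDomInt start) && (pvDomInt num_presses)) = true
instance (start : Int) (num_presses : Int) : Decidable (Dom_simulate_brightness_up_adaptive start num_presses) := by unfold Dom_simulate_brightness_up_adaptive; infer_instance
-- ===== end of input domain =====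

-- B computes the run in three phases: a closed-form arithmetic progression for the sub-200 ramp
-- (where the adaptive step is provably always MIN_STEP), an iterated 5%-growth phase, and a
-- constant cap phase; objective: alternative decomposition (same asymptotic cost).
-- Python's int(current * 5 / 100) truncates toward zero; within the stated |int| ≤ 2^31 domain the
-- float division is exact enough that it equals Int.tdiv (current * 5) 100 (the exact quotient is a
-- multiple of 1/100, at distance ≥ 1/100 ≫ the rounding error from any other integer).

-- ===== PORT A =====
def simulate_brightness_up_adaptive (start : Int) (num_presses : Int) : List Int :=
  -- for _ in range(num_presses): compute step, update current, append
  ((List.range num_presses.toNat).foldl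
    (fun (s : List Int × Int) _ =>
      let step : Int := if s.2 == 0 then 10 else max 10 (Int.tdiv (s.2 * 5) 100)
      let current := min 2010 (s.2 + step)
      (s.1 ++ [current], current))
    ([start], start)).1

-- ===== PORT B =====
def simulate_brightness_up_adaptive_alt (start : Int) (num_presses : Int) : List Int :=
  let n : Int := max 0 num_presses
  -- k = min(n, (200 - start + 9) // 10) if start < 200 else 0
  let k : Int := if start < 200 then min n (PySem.Int.floordiv (200 - start + 9) 10) else 0
  -- values = [start + 10 * i for i in range(k + 1)]
  let values : List Int := (List.range (k + 1).toNat).map (fun i : Nat => start + 10 * (i : Int))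
  let current : Int := start + 10 * k
  -- for _ in range(n - k): saturated append or proportional step
  ((List.range (n - k).toNat).foldl
    (fun (s : List Int × Int) _ =>
      if 2010 ≤ s.2 then (s.1 ++ [2010], s.2)
      else
        let cur := min 2010 (s.2 + PySem.Int.floordiv (s.2 * 5) 100)
        (s.1 ++ [cur], cur))
    (values, current)).1

-- ===== PRECONDITION & SPEC =====
def Spec_simulate_brightness_up_adaptive (start : Int) (num_presses : Int) (out : List Int) : Prop := out = simulate_brightness_up_adaptive_alt start num_presses
instance (start : Int) (num_presses : Int) (out : List Int) : Decidable (Spec_simulate_brightness_up_adaptive start num_presses out) := by unfold Spec_simulate_brightness_up_adaptive; infer_instance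

-- ===== CLAIM =====
def Claim_equal_simulate_brightness_up_adaptive : Prop := ∀ (start : Int) (num_presses : Int), Dom_simulate_brightness_up_adaptive start num_presses → Spec_simulate_brightness_up_adaptive start num_presses (simulate_brightness_up_adaptive start num_presses)

-- ===== LEMMAS AND PROOFS =====

-- one adaptive press, as A computes it
def pvNextVal (current : Int) : Int :=
  min 2010 (current + (if current == 0 then 10 else max 10 (Int.tdiv (current * 5) 100)))

-- the tail (everything after the initial value) of the sequence of brightness values
def pvChainTail (c : Int) (k : Nat) : List Int :=
  match k with
  | 0 => []
  | k + 1 => pvNextVal c :: pvChainTail (pvNextVal c) k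

-- A's foldl produces vs ++ (c's chain tail)
theorem pvFoldl_chain (l : List Nat) (vs : List Int) (c : Int) :
    (l.foldl
      (fun (s : List Int × Int) _ =>
        let step : Int := if s.2 == 0 then 10 else max 10 (Int.tdiv (s.2 * 5) 100)
        let current := min 2010 (s.2 + step)
        (s.1 ++ [current], current))
      (vs ++ [c], c)).1 = vs ++ c :: pvChainTail c l.length := by
  induction l generalizing vs c with
  | nil => simp [pvChainTail]
  | cons a l ih =>
    simp only [List.foldl_cons, List.length_cons, pvChainTail]
    have := ih (vs ++ [c]) (pvNextVal c)
    simp only [pvNextVal] at this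
    simp only [List.append_assoc] at this ⊢
    exact this.trans rfl

-- below 200 the adaptive press is exactly +10
theorem pvNext_low (c : Int) (h : c < 200) : pvNextVal c = c + 10 := by
  unfold pvNextVal
  by_cases h0 : c = 0
  · simp [h0]
  · have hne : (c == 0) = false := by simp [h0]
    rw [hne]
    simp only [Bool.false_eq_true, if_false]
    have hb : (0:Int) < 100 := by omega
    have htd : Int.tdiv (c * 5) 100 ≤ 9 := by
      by_cases hc : 0 ≤ c
      · have : Int.tdiv (c * 5) 100 = (c * 5) / 100 := Int.tdiv_eq_ediv_of_nonneg (by omega)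
        rw [this]; omega
      · have h1 : (-(c * 5)).tdiv 100 = -((c * 5).tdiv 100) := Int.neg_tdiv _ _
        have h2 : (-(c * 5)).tdiv 100 = (-(c * 5)) / 100 := Int.tdiv_eq_ediv_of_nonneg (by omega)
        omega
    have hm : max 10 (Int.tdiv (c * 5) 100) = 10 := by omega
    rw [hm]; omega

-- at or above the cap the press returns the cap
theorem pvNext_cap (c : Int) (h : 2010 ≤ c) : pvNextVal c = 2010 := by
  unfold pvNextVal
  have hne : (c == 0) = false := by simp; omega
  rw [hne]
  simp only [Bool.false_eq_true, if_false]
  have : 10 ≤ max 10 (Int.tdiv (c * 5) 100) := le_max_left _ _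
  omega

-- in the proportional band A's step equals B's floor division, and stays ≥ 200
theorem pvNext_mid (c : Int) (h1 : 200 ≤ c) (h2 : c < 2010) :
    pvNextVal c = min 2010 (c + PySem.Int.floordiv (c * 5) 100) ∧ 200 ≤ pvNextVal c := by
  have hfd : PySem.Int.floordiv (c * 5) 100 = (c * 5) / 100 :=
    PySem.Int.floordiv_eq_ediv_of_pos (by omega)
  have htd : Int.tdiv (c * 5) 100 = (c * 5) / 100 := Int.tdiv_eq_ediv_of_nonneg (by omega)
  have h10 : 10 ≤ (c * 5) / 100 := by omega
  have hne : (c == 0) = false := by simp; omega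
  unfold pvNextVal
  rw [hne]
  simp only [Bool.false_eq_true, if_false]
  rw [htd, hfd]
  constructor
  · have : max 10 (c * 5 / 100) = c * 5 / 100 := by omega
    rw [this]
  · have : max 10 (c * 5 / 100) = c * 5 / 100 := by omega
    rw [this]; omega

-- the chain tail is constant at the cap
theorem pvChainTail_cap (c : Int) (h : 2010 ≤ c) (k : Nat) :
    pvChainTail c k = List.replicate k 2010 := by
  induction k generalizing c with
  | zero => simp [pvChainTail]
  | succ k ih =>
    simp only [pvChainTail, pvNext_cap c h, List.replicate_succ]
    exact congrArg _ (ih 2010 (by omega))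

-- B's loop body, named for the lemmas
def pvGeoStep (s : List Int × Int) (_ : Nat) : List Int × Int :=
  if 2010 ≤ s.2 then (s.1 ++ [2010], s.2)
  else
    let cur := min 2010 (s.2 + PySem.Int.floordiv (s.2 * 5) 100)
    (s.1 ++ [cur], cur)

-- once saturated B keeps appending the cap
theorem pvGeo_cap (l : List Nat) (L : List Int) (c : Int) (h : 2010 ≤ c) :
    (l.foldl pvGeoStep (L, c)).1 = L ++ List.replicate l.length 2010 := by
  induction l generalizing L with
  | nil => simp
  | cons a l ih =>
    simp only [List.foldl_cons, List.length_cons, pvGeoStep, if_pos h, List.replicate_succ]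
    rw [ih (L ++ [2010])]
    simp

-- from any point ≥ 200, B's loop appends exactly A's chain tail
theorem pvGeo_chain (l : List Nat) (L : List Int) (c : Int) (h : 200 ≤ c) :
    (l.foldl pvGeoStep (L, c)).1 = L ++ pvChainTail c l.length := by
  induction l generalizing L c with
  | nil => simp [pvChainTail]
  | cons a l ih =>
    simp only [List.foldl_cons, List.length_cons, pvChainTail]
    by_cases hc : 2010 ≤ c
    · simp only [pvGeoStep, if_pos hc]
      rw [pvGeo_cap l _ c hc, pvNext_cap c hc, pvChainTail_cap 2010 (by omega)]
      simp
    · obtain ⟨heq, hge⟩ := pvNext_mid c h (by omega)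
      simp only [pvGeoStep, if_neg hc]
      rw [ih (L ++ [min 2010 (c + PySem.Int.floordiv (c * 5) 100)]) _ (heq ▸ hge), ← heq]
      simp

-- the linear ramp: k presses below 200 give the arithmetic progression
theorem pvLin_chain (k n : Nat) (start : Int) (hk : ∀ i : Nat, i < k → start + 10 * i < 200)
    (hkn : k ≤ n) :
    start :: pvChainTail start n
      = (List.range (k + 1)).map (fun i : Nat => start + 10 * (i : Int))
        ++ pvChainTail (start + 10 * k) (n - k) := by
  induction k generalizing start n with
  | zero => simp
  | succ k ih =>
    have h0 : start < 200 := by have := hk 0 (by omega); simpa using this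
    obtain ⟨n', rfl⟩ : ∃ n', n = n' + 1 := ⟨n - 1, by omega⟩
    have hstep : pvNextVal start = start + 10 := pvNext_low start h0
    have ih' := ih n' (start + 10)
      (fun i hi => by have := hk (i + 1) (by omega); push_cast at this ⊢; omega)
      (by omega)
    have hmap : (List.range (k + 1 + 1)).map (fun i : Nat => start + 10 * (i : Int))
        = start :: (List.range (k + 1)).map (fun i : Nat => start + 10 + 10 * (i : Int)) := by
      rw [List.range_succ_eq_map, List.map_cons, List.map_map]
      congr 1
      · simp
      · apply List.map_congr_left; intro a _; simp [Function.comp]; ring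
    rw [show pvChainTail start (n' + 1) = pvNextVal start :: pvChainTail (pvNextVal start) n' from rfl,
        hstep, hmap, List.cons_append]
    congr 1
    have e2 : n' + 1 - (k + 1) = n' - k := by omega
    have e1 : start + 10 * ((k + 1 : Nat) : Int) = start + 10 + 10 * (k : Int) := by push_cast; ring
    rw [e2, e1, ih']

-- ===== VERDICT =====
theorem simulate_brightness_up_adaptive_spec : Claim_equal_simulate_brightness_up_adaptive := by
  intro start num_presses _
  unfold Spec_simulate_brightness_up_adaptive
  unfold simulate_brightness_up_adaptive simulate_brightness_up_adaptive_alt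
  have hA := pvFoldl_chain (List.range num_presses.toNat) [] start
  simp only [List.nil_append, List.length_range] at hA
  rw [hA]
  set n : Int := max 0 num_presses with hn
  have hn0 : 0 ≤ n := le_max_left _ _
  have hnn : n.toNat = num_presses.toNat := by omega
  rw [← hnn]
  by_cases hs : start < 200
  · -- linear phase present
    have hq : PySem.Int.floordiv (200 - start + 9) 10 = (200 - start + 9) / 10 :=
      PySem.Int.floordiv_eq_ediv_of_pos (by omega)
    set q : Int := (200 - start + 9) / 10 with hqdef
    have hq1 : 1 ≤ q := by omega
    have hqlo : 200 - start ≤ 10 * q := by omega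
    have hqhi : 10 * q ≤ 209 - start := by omega
    set k : Int := min n q with hkdef
    have hk0 : 0 ≤ k := by omega
    have hkn : k ≤ n := min_le_left _ _
    simp only [if_pos hs, hq, ← hkdef]
    have hk1 : (k + 1).toNat = k.toNat + 1 := by omega
    have hkcast : ((k.toNat : Int)) = k := by omega
    rw [hk1]
    have hlin := pvLin_chain k.toNat n.toNat start
      (fun i hi => by
        have hik : (i : Int) < k := by omega
        have : (i : Int) ≤ q - 1 := by omega
        omega)
      (by omega)
    rw [hkcast] at hlin
    rw [hlin]
    have hsub : n.toNat - k.toNat = (n - k).toNat := by omega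
    rw [hsub]
    rcases Nat.eq_zero_or_pos (n - k).toNat with hz | hpos
    · rw [hz]; simp [pvChainTail]
    · have hkq : k = q := by omega
      have hge : 200 ≤ start + 10 * k := by omega
      have := pvGeo_chain (List.range (n - k).toNat)
        ((List.range (k.toNat + 1)).map (fun i : Nat => start + 10 * (i : Int)))
        (start + 10 * k) hge
      simp only [List.length_range] at this
      rw [← this]
      rfl
  · -- start ≥ 200: k = 0, values = [start]
    simp only [if_neg hs]
    have : ((0:Int) + 1).toNat = 1 := by omega
    rw [this]
    have hgeo := pvGeo_chain (List.range (n - 0).toNat) [start] (start + 10 * 0) (by omega)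
    simp only [List.length_range] at hgeo
    rw [show (List.range 1).map (fun i : Nat => start + 10 * (i : Int)) = [start] by simp]
    show start :: pvChainTail start n.toNat
        = (List.foldl pvGeoStep ([start], start + 10 * 0) (List.range (n - 0).toNat)).1
    rw [hgeo]
    norm_num
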